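-- pv_equiv track=rewrite | github.com/cleverlzc/lzcgit | count_single_letter_num.py | count_single_digital_num
-- ===== SOURCE A (Python) =====
-- def count_single_digital_num(digit_str: str) -> int:
--     result = 0
--     str_len = len(digit_str)
--     for i in range(str_len - 1):
--         result += 1
--         digit = digit_str[i]
--         for j in range(i + 1, str_len):
--             if digit_str[j] == digit:
--                 result += 1
--             else:
--                 break
--     result += 1
--     return result
-- ===== SOURCE B (Python) =====
-- def count_single_digital_num(digit_str: str) -> int:
--     total = 0
--     i = 0
--     n = len(digit_str)
--     while i < n:
--         c = digit_str[i]
--         run_len = 1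
--         i += 1
--         while i < n and digit_str[i] == c:
--             run_len += 1
--             i += 1
--         total += run_len * (run_len + 1) // 2
--     return total
-- ===== Notes on version B (the rewrite author's own statement) =====
-- stated objective: faster
-- what changed: Replaces the quadratic nested scan (for every index, re-scan the following equal characters) by a single left-to-right pass over maximal equal-character runs, adding L*(L+1)//2 per run of length L.
-- intended difference: On the empty string A returns 1 (its unconditional trailing 'result += 1'), while B returns 0, the intended count of equal-character substrings of an empty string. — e.g. on count_single_digital_num(""): A returns 1, B returns 0
import Mathlib
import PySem

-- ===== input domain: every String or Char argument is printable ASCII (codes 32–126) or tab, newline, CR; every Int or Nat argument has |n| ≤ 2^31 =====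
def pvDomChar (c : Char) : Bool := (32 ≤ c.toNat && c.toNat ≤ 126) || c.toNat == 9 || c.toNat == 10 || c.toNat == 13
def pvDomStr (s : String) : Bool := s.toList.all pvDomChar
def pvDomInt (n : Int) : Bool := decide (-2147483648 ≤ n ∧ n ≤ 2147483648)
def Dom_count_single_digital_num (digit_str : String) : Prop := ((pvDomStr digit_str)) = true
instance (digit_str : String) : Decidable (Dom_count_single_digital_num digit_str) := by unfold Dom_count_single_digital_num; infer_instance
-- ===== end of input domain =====

-- B replaces A's per-index re-scan of following equal characters by a single pass
-- over maximal equal-character runs, adding run_len*(run_len+1)//2 per run (faster);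
-- on the empty string A returns 1 (its unconditional trailing 'result += 1') while
-- B returns the intended 0 — see D_ below.


-- ===== PORT A =====
-- inner 'for j in range(i+1, str_len)' loop with its break
def pvInnerA (cs : List Char) (digit : Char) : List Int → Int → Int
  | [], r => r
  | j :: js, r =>
    if PySem.List.pyGet? cs j = some digit then pvInnerA cs digit js (r + 1) else r

-- the body of the outer 'for i in range(str_len - 1)' loop
def pvBodyA (cs : List Char) (str_len : Int) (result i : Int) : Int :=
  let result := result + 1
  match PySem.List.pyGet? cs i with
  | some digit => pvInnerA cs digit (PySem.List.pyRange (i + 1) str_len 1) result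
  | none => result   -- unreachable: i is always in range

def count_single_digital_num (digit_str : String) : Int :=
  let cs := digit_str.toList
  let str_len : Int := cs.length
  let result := (PySem.List.pyRange 0 (str_len - 1) 1).foldl (pvBodyA cs str_len) 0
  result + 1

-- ===== PORT B =====
-- the inner 'while i < n and digit_str[i] == c' scan: run_len accumulates, at the
-- end of the run add run_len*(run_len+1)//2 and start the next run
def pvRunAux (c : Char) (run_len : Int) : List Char → Int
  | [] => PySem.Int.floordiv (run_len * (run_len + 1)) 2
  | d :: rest =>
    if d == c then pvRunAux c (run_len + 1) rest
    else PySem.Int.floordiv (run_len * (run_len + 1)) 2 + pvRunAux d 1 rest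

def count_single_digital_num_alt (digit_str : String) : Int :=
  match digit_str.toList with
  | [] => 0
  | c :: rest => pvRunAux c 1 rest

-- ===== PRECONDITION & SPEC =====
-- On the empty string A returns 1 (its unconditional trailing 'result += 1'), while B
-- returns 0, the intended count of single-letter substrings of an empty string.
def D_count_single_digital_num (digit_str : String) : Prop := digit_str = ""
instance (digit_str : String) : Decidable (D_count_single_digital_num digit_str) := by unfold D_count_single_digital_num; infer_instance

def Spec_count_single_digital_num (digit_str : String) (out : Int) : Prop := ¬ D_count_single_digital_num digit_str → out = count_single_digital_num_alt digit_str
instance (digit_str : String) (out : Int) : Decidable (Spec_count_single_digital_num digit_str out) := by unfold Spec_count_single_digital_num; infer_instance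

def pvDiffWitness_count_single_digital_num : String := ""
def pvDiffWitnessOut_count_single_digital_num : Int × Int := (1, 0)

-- ===== CLAIM (what is proved, stated in full; the proofs are below) =====
def Claim_unchanged_count_single_digital_num : Prop := ∀ (digit_str : String), Dom_count_single_digital_num digit_str → Spec_count_single_digital_num digit_str (count_single_digital_num digit_str)
def Claim_changed_count_single_digital_num : Prop := Dom_count_single_digital_num (pvDiffWitness_count_single_digital_num) ∧ D_count_single_digital_num (pvDiffWitness_count_single_digital_num) ∧ count_single_digital_num (pvDiffWitness_count_single_digital_num) = pvDiffWitnessOut_count_single_digital_num.1 ∧ count_single_digital_num_alt (pvDiffWitness_count_single_digital_num) = pvDiffWitnessOut_count_single_digital_num.2 ∧ pvDiffWitnessOut_count_single_digital_num.1 ≠ pvDiffWitnessOut_count_single_digital_num.2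
def Claim_exact_count_single_digital_num : Prop := ∀ (digit_str : String), Dom_count_single_digital_num digit_str → D_count_single_digital_num digit_str → count_single_digital_num digit_str ≠ count_single_digital_num_alt digit_str

-- ===== LEMMAS AND PROOFS =====

-- length of the maximal equal prefix, as an Int
def pvPc (digit : Char) (l : List Char) : Int := ((l.takeWhile (· == digit)).length : Int)

theorem pvPc_cons (d x : Char) (t : List Char) :
    pvPc d (x :: t) = if x == d then 1 + pvPc d t else 0 := by
  simp only [pvPc, List.takeWhile_cons]
  by_cases h : x == d
  · simp [h]; omega
  · simp [h]

-- the triangle-number step: floordiv (a*(a+1)) 2 = a + floordiv ((a-1)*a) 2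
theorem pvTriStep (a : Int) :
    PySem.Int.floordiv (a * (a + 1)) 2 = a + PySem.Int.floordiv ((a - 1) * a) 2 := by
  rw [PySem.Int.floordiv_eq_ediv_of_pos (by norm_num), PySem.Int.floordiv_eq_ediv_of_pos (by norm_num)]
  have h : a * (a + 1) = (a - 1) * a + a * 2 := by ring
  rw [h, Int.add_mul_ediv_right _ _ (by norm_num)]
  ring

-- A's sum of per-start contributions, structurally
def pvG : List Char → Int
  | [] => 0
  | [_] => 0
  | c :: d :: rest => 1 + pvPc c (d :: rest) + pvG (d :: rest)

-- A's inner loop computes r + (equal-prefix length of the suffix starting at a)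
theorem pvInnerA_eq (cs : List Char) (digit : Char) :
    ∀ (t : List Char) (a r : Int), 0 ≤ a → cs.drop a.toNat = t →
      pvInnerA cs digit (PySem.List.pyRange a (cs.length : Int) 1) r = r + pvPc digit t := by
  intro t
  induction t with
  | nil =>
    intro a r ha hd
    have hle : (cs.length : Int) ≤ a := by
      have := List.drop_eq_nil_iff.mp hd; omega
    rw [PySem.List.pyRange_one_eq_nil hle]
    simp [pvInnerA, pvPc]
  | cons x t' ih =>
    intro a r ha hd
    have hlt : a.toNat < cs.length := by
      by_contra h
      rw [List.drop_eq_nil_iff.mpr (by omega)] at hd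
      simp at hd
    have halt : a < (cs.length : Int) := by omega
    have hget : PySem.List.pyGet? cs a = some x := by
      rw [PySem.List.pyGet?_of_nonneg cs ha]
      have h0 : (List.drop a.toNat cs)[0]? = some x := by rw [hd]; rfl
      rw [List.getElem?_drop] at h0
      simpa using h0
    have hd' : cs.drop (a + 1).toNat = t' := by
      have he : (a + 1).toNat = a.toNat + 1 := by omega
      have h1 := congrArg (List.drop 1) hd
      rw [List.drop_drop] at h1
      rw [he]
      simpa [Nat.add_comm] using h1
    rw [PySem.List.pyRange_one_cons halt]
    simp only [pvInnerA, hget, Option.some.injEq, pvPc_cons]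
    by_cases hx : x = digit
    · simp only [hx, beq_self_eq_true, if_pos trivial]
      rw [ih (a + 1) (r + 1) (by omega) hd']
      ring
    · have hb : (x == digit) = false := by simp [hx]
      simp [hx, hb]

-- A's outer loop from start index a computes r + pvG (suffix starting at a)
theorem pvOuter_eq (cs : List Char) :
    ∀ (t : List Char) (a r : Int), 0 ≤ a → cs.drop a.toNat = t →
      (PySem.List.pyRange a ((cs.length : Int) - 1) 1).foldl (pvBodyA cs (cs.length : Int)) r
        = r + pvG t := by
  intro t
  induction t with
  | nil =>
    intro a r ha hd
    have hle : (cs.length : Int) ≤ a := by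
      have := List.drop_eq_nil_iff.mp hd; omega
    rw [PySem.List.pyRange_one_eq_nil (by omega)]
    simp [pvG]
  | cons x t' ih =>
    intro a r ha hd
    have hlt : a.toNat < cs.length := by
      by_contra h
      rw [List.drop_eq_nil_iff.mpr (by omega)] at hd
      simp at hd
    have hget : PySem.List.pyGet? cs a = some x := by
      rw [PySem.List.pyGet?_of_nonneg cs ha]
      have h0 : (List.drop a.toNat cs)[0]? = some x := by rw [hd]; rfl
      rw [List.getElem?_drop] at h0
      simpa using h0
    have hd' : cs.drop (a + 1).toNat = t' := by
      have he : (a + 1).toNat = a.toNat + 1 := by omega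
      have h1 := congrArg (List.drop 1) hd
      rw [List.drop_drop] at h1
      rw [he]
      simpa [Nat.add_comm] using h1
    have hlen : t'.length + a.toNat + 1 = cs.length := by
      have := congrArg List.length hd
      simp [List.length_drop] at this
      omega
    cases t' with
    | nil =>
      simp only [List.length_nil] at hlen
      have : (cs.length : Int) - 1 ≤ a := by omega
      rw [PySem.List.pyRange_one_eq_nil this]
      simp [pvG]
    | cons y t'' =>
      have halt : a < (cs.length : Int) - 1 := by
        simp only [List.length_cons] at hlen; omega
      rw [PySem.List.pyRange_one_cons halt, List.foldl_cons]
      have hbody : pvBodyA cs (cs.length : Int) r a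
          = r + 1 + pvPc x (y :: t'') := by
        simp only [pvBodyA, hget]
        exact pvInnerA_eq cs x (y :: t'') (a + 1) (r + 1) (by omega) hd'
      rw [hbody, ih (a + 1) (r + 1 + pvPc x (y :: t'')) (by omega) hd']
      simp only [pvG]
      ring

-- shifting pvRunAux's accumulated run length down by one costs (run_len + pc)
theorem pvRunAux_step (t : List Char) : ∀ (c : Char) (len : Int),
    pvRunAux c len t = (len + pvPc c t) + pvRunAux c (len - 1) t := by
  induction t with
  | nil =>
    intro c len
    simp only [pvRunAux, pvPc, List.takeWhile_nil, List.length_nil, Int.natCast_zero]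
    have h1 : (len - 1) * (len - 1 + 1) = (len - 1) * len := by ring
    rw [h1]
    have := pvTriStep len
    omega
  | cons d t' ih =>
    intro c len
    by_cases hdc : d = c
    · subst hdc
      simp only [pvRunAux, beq_self_eq_true, if_true, pvPc_cons]
      have h1 : len - 1 + 1 = len := by ring
      rw [h1, ih d (len + 1)]
      have h2 : len + 1 - 1 = len := by ring
      rw [h2]
      omega
    · have hb : (d == c) = false := beq_eq_false_iff_ne.mpr hdc
      have hb2 : (c == d) = false := beq_eq_false_iff_ne.mpr (fun h => hdc h.symm)
      simp only [pvRunAux, hb, Bool.false_eq_true, if_false, pvPc_cons]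
      have h1 : (len - 1) * (len - 1 + 1) = (len - 1) * len := by ring
      rw [h1]
      have := pvTriStep len
      omega

-- the run-scan recurrence: peeling one character costs 1 + (its equal-prefix length)
theorem pvRunScan_cons (c d : Char) (t : List Char) :
    pvRunAux c 1 (d :: t) = 1 + pvPc c (d :: t) + pvRunAux d 1 t := by
  have h0 : pvRunAux c 0 (d :: t) = pvRunAux d 1 t := by
    by_cases hdc : d = c
    · subst hdc
      simp [pvRunAux]
    · have hb : (d == c) = false := beq_eq_false_iff_ne.mpr hdc
      simp only [pvRunAux, hb, Bool.false_eq_true, if_false]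
      have hz : PySem.Int.floordiv (0 * (0 + 1)) 2 = 0 := by decide
      rw [hz, zero_add]
  have hs := pvRunAux_step (d :: t) c 1
  norm_num at hs
  rw [hs, h0]

-- the two sides agree on every nonempty list
theorem pvG_add_one (cs : List Char) : cs ≠ [] →
    pvG cs + 1 = (match cs with | [] => 0 | c :: rest => pvRunAux c 1 rest) := by
  induction cs with
  | nil => intro h; exact absurd rfl h
  | cons c rest ih =>
    intro _
    cases rest with
    | nil =>
      simp only [pvG, pvRunAux]
      decide
    | cons d t =>
      simp only [pvG, pvRunScan_cons c d t]
      have := ih (by simp)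
      simp only at this
      omega

-- ===== VERDICT (by name: the statement is the Claim_ definition above) =====
theorem count_single_digital_num_spec : Claim_unchanged_count_single_digital_num := by
  intro s _ hD
  have hne : s.toList ≠ [] := by
    intro h
    exact hD (by unfold D_count_single_digital_num; exact String.toList_eq_nil_iff.mp h)
  simp only [count_single_digital_num, count_single_digital_num_alt]
  rw [pvOuter_eq s.toList s.toList 0 0 le_rfl (by simp)]
  have := pvG_add_one s.toList hne
  omega

theorem count_single_digital_num_changed : Claim_changed_count_single_digital_num := by
  unfold Claim_changed_count_single_digital_num; decide

theorem count_single_digital_num_tight : Claim_exact_count_single_digital_num := by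
  intro s _ hD
  rw [hD]
  decide
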